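-- pv_equiv track=rewrite | github.com/russianhandwhore/wa-rfp-tracker | scrapers/scrape_kingcounty.py | dedup_records
-- ===== SOURCE A (Python) =====
-- def base_solicitation_id(sol_id):
--     """Strip amendment suffix: 'KC001604,2' → 'KC001604'."""
--     return sol_id.split(",")[0].strip()
--
-- def amendment_version(sol_id):
--     """Return amendment number: 'KC001604,2' → 2, 'KC001604' → 0."""
--     parts = sol_id.split(",")
--     if len(parts) == 2:
--         try:
--             return int(parts[1])
--         except ValueError:
--             return 0
--     return 0
--
-- def dedup_records(records):
--     """Keep only the highest-version amendment per base solicitation ID."""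
--     best = {}
--     for r in records:
--         base = base_solicitation_id(r["sol_id"])
--         ver  = amendment_version(r["sol_id"])
--         if base not in best or ver > amendment_version(best[base]["sol_id"]):
--             best[base] = r
--     return list(best.values())
-- ===== SOURCE B (Python) =====
-- def base_solicitation_id(sol_id):
--     return sol_id.split(",")[0].strip()
--
-- def amendment_version(sol_id):
--     parts = sol_id.split(",")
--     if len(parts) == 2:
--         try:
--             return int(parts[1])
--         except ValueError:
--             return 0
--     return 0
--
-- def dedup_records(records):
--     """Group records by base solicitation ID, then pick each group's first maximal amendment."""
--     groups = {}
--     for r in records: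
--         groups.setdefault(base_solicitation_id(r["sol_id"]), []).append(r)
--     return [max(g, key=lambda r: amendment_version(r["sol_id"])) for g in groups.values()]
-- ===== Notes on version B (the rewrite author's own statement) =====
-- stated objective: alternative
-- what changed: B first groups all records by base solicitation ID into an insertion-ordered dict of lists, then reduces each group with max(..., key=amendment_version) (first maximal on ties), instead of A's single pass that keeps one running best record per key.
import Mathlib
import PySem

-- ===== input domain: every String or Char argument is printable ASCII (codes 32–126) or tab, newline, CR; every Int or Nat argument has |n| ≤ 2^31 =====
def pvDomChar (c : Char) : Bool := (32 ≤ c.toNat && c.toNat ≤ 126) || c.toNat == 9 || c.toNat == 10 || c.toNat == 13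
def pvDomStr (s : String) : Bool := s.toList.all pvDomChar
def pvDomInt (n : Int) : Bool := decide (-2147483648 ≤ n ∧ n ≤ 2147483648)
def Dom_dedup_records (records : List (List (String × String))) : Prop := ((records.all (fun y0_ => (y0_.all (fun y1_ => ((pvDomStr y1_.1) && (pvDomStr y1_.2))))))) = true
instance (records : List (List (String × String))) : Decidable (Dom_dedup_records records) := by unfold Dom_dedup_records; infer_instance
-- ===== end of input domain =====

-- B separates grouping (one dict of base-id → list) from reduction (first-maximal element per
-- group) instead of maintaining a single running best per key; same cost, different decomposition.

-- shared module-level helpers (identical in Source A and Source B):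
-- r["sol_id"]: first match in the record; Pre_ excludes records without the key (KeyError)
def pvSolId (r : List (String × String)) : String :=
  ((PySem.Dict.mk r).get? "sol_id").getD ""

-- base_solicitation_id: sol_id.split(",")[0].strip()  ([0] always exists: split is never empty)
def pvBaseId (s : String) : String :=
  PySem.Str.strip (((PySem.Str.split? s ",").getD []).getD 0 "")  -- sep "," ≠ "": split? is always some

-- amendment_version: int(parts[1]) with ValueError → 0 is exactly (ofStr? _).getD 0
def pvVer (s : String) : Int :=
  let parts := (PySem.Str.split? s ",").getD []  -- sep "," ≠ "": split? is always some
  if parts.length = 2 then (PySem.Int.ofStr? (parts.getD 1 "")).getD 0 else 0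

-- ===== PORT A =====
def dedup_records (records : List (List (String × String))) : List (List (String × String)) :=
  (records.foldl (fun best r =>
      let base := pvBaseId (pvSolId r)
      let ver := pvVer (pvSolId r)
      if best.contains base = false then best.insert base r
      else if pvVer (pvSolId ((best.get? base).getD [])) < ver then best.insert base r
      else best)
    (PySem.Dict.empty : PySem.Dict String (List (String × String)))).values

-- ===== PORT B =====
def dedup_records_alt (records : List (List (String × String))) : List (List (String × String)) :=
  ((records.foldl (fun groups r =>
      PySem.Dict.modify groups (pvBaseId (pvSolId r)) [] (· ++ [r]))
    (PySem.Dict.empty : PySem.Dict String (List (List (String × String))))).values).map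
    (fun g => (PySem.List.max? g (fun r => pvVer (pvSolId r))).getD [])

-- ===== PRECONDITION & SPEC =====
-- Pre_ excludes exactly the inputs on which Python A raises KeyError: a record without a "sol_id" key.
def Pre_dedup_records (records : List (List (String × String))) : Prop :=
  (records.all (fun r => r.any (fun p => p.1 == "sol_id"))) = true
instance (records : List (List (String × String))) : Decidable (Pre_dedup_records records) := by unfold Pre_dedup_records; infer_instance

def pvWitness_dedup_records : (List (List (String × String))) :=
  [[("sol_id", "KC001604,2"), ("title", "roads")], [("sol_id", "KC001604")], [("sol_id", "KC002,1")]]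

def Spec_dedup_records (records : List (List (String × String))) (out : List (List (String × String))) : Prop := out = dedup_records_alt records
instance (records : List (List (String × String))) (out : List (List (String × String))) : Decidable (Spec_dedup_records records out) := by unfold Spec_dedup_records; infer_instance

-- ===== CLAIM (what is proved, stated in full; the proofs are below) =====
def Claim_equal_dedup_records : Prop := ∀ (records : List (List (String × String))), Dom_dedup_records records → Pre_dedup_records records → Spec_dedup_records records (dedup_records records)

-- ===== LEMMAS AND PROOFS =====

-- abbreviations used only by the proofs
def pvKey (r : List (String × String)) : String := pvBaseId (pvSolId r)
def pvVerOf (r : List (String × String)) : Int := pvVer (pvSolId r)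
def pvPick (g : List (List (String × String))) : List (String × String) :=
  (PySem.List.max? g (fun r => pvVerOf r)).getD []

-- max of g ++ [x] in terms of max of g (max? is the running first-maximal foldl)
lemma pvMax_append (g : List (List (String × String))) (x : List (String × String)) :
    PySem.List.max? (g ++ [x]) (fun r => pvVerOf r) =
      match PySem.List.max? g (fun r => pvVerOf r) with
      | none => some x
      | some m => if pvVerOf m < pvVerOf x then some x else some m := by
  cases hmg : PySem.List.max? g (fun r => pvVerOf r) with
  | none =>
    rw [(PySem.List.max?_eq_none_iff _ _).mp hmg]
    rfl
  | some m =>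
    simp only [PySem.List.max?] at hmg ⊢
    rw [List.foldl_append, hmg, List.foldl_cons, List.foldl_nil]

-- get? through an items-level value map that keeps keys
lemma pvGet?_mk_map (l : List (String × List (List (String × String))))
    (f : List (List (String × String)) → List (String × String)) (c : String) :
    (PySem.Dict.mk (l.map (fun p => (p.1, f p.2)))).get? c
      = ((PySem.Dict.mk l).get? c).map f := by
  induction l with
  | nil => simp [PySem.Dict.get?]
  | cons p t ih =>
    obtain ⟨k, v⟩ := p
    simp only [List.map_cons, PySem.Dict.get?_mk_cons]
    by_cases h : (k == c) = true <;> simp [h, ih]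

-- a Dict is the mk of its items
lemma pvDict_eq_mk {κ ν : Type} [BEq κ] (d : PySem.Dict κ ν) : d = PySem.Dict.mk d.items := rfl

-- the loop invariant: A's best is B's groups with every group reduced to its first maximal record
lemma pvMain (records : List (List (String × String)))
    (best : PySem.Dict String (List (String × String)))
    (groups : PySem.Dict String (List (List (String × String))))
    (hitems : best.items = groups.items.map (fun p => (p.1, pvPick p.2)))
    (hnodup : (groups.items.map (·.1)).Nodup)
    (hne : ∀ p ∈ groups.items, p.2 ≠ []) :
    (records.foldl (fun best r =>
        let base := pvBaseId (pvSolId r)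
        let ver := pvVer (pvSolId r)
        if best.contains base = false then best.insert base r
        else if pvVer (pvSolId ((best.get? base).getD [])) < ver then best.insert base r
        else best) best).items
      = ((records.foldl (fun groups r =>
            PySem.Dict.modify groups (pvBaseId (pvSolId r)) [] (· ++ [r])) groups).items).map
          (fun p => (p.1, pvPick p.2)) := by
  induction records generalizing best groups with
  | nil => simpa using hitems
  | cons r rest ih =>
    simp only [List.foldl_cons]
    have hkeys : best.keys = groups.keys := by
      simp only [PySem.Dict.keys, hitems, List.map_map]
      exact List.map_congr_left (fun p _ => rfl)
    have hcontains : ∀ x, best.contains x = groups.contains x := by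
      intro x
      rw [PySem.Dict.contains_eq_decide_mem_keys, PySem.Dict.contains_eq_decide_mem_keys, hkeys]
    set c := pvBaseId (pvSolId r) with hc
    have hget : best.get? c = (groups.get? c).map pvPick := by
      rw [pvDict_eq_mk best, hitems, pvGet?_mk_map, ← pvDict_eq_mk groups]
    by_cases hmem : groups.contains c = true
    · -- key already present: B appends r to the group; A replaces iff strictly larger version
      obtain ⟨g, hg⟩ : ∃ g, groups.get? c = some g := by
        have := PySem.Dict.contains_eq_isSome_get? (d := groups) (k := c)
        rw [hmem] at this
        exact Option.isSome_iff_exists.mp this.symm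
      have hgetc : best.get? c = some (pvPick g) := by rw [hget, hg]; rfl
      have hmod : PySem.Dict.modify groups c [] (· ++ [r]) = groups.insert c (g ++ [r]) := by
        simp only [PySem.Dict.modify]
        rw [PySem.Dict.getD_of_get?_eq_some groups ([] : List (List (String × String))) hg]
      have hnodupkeys : groups.keys.Nodup := hnodup
      have huniq : ∀ p ∈ groups.items, p.1 = c → p.2 = g := by
        intro p hp hpc
        have := PySem.Dict.get?_of_mem_items (d := groups) (k := p.1) (v := p.2)
          (by simpa using hp) hnodupkeys
        rw [hpc, hg] at this
        exact (Option.some_inj.mp this).symm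
      have hcontb : best.contains c = true := by rw [hcontains]; exact hmem
      rw [hmod]
      by_cases hlt : pvVer (pvSolId ((best.get? c).getD [])) < pvVer (pvSolId r)
      · -- strictly larger version: both sides replace the kept record by r
        simp only [hcontb, hlt, if_true, if_false, Bool.true_eq_false]
        apply ih
        · rw [PySem.Dict.items_insert_of_contains best r hcontb,
              PySem.Dict.items_insert_of_contains groups (g ++ [r]) hmem,
              hitems, List.map_map, List.map_map]
          apply List.map_congr_left
          intro p hp
          by_cases hpc : (p.1 == c) = true
          · have hpc' : p.1 = c := by simpa using hpc
            have hpg := huniq p hp hpc'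
            have hpick : pvPick (g ++ [r]) = r := by
              rw [hgetc] at hlt
              simp only [Option.getD_some] at hlt
              unfold pvPick
              rw [pvMax_append]
              have : pvVerOf (pvPick g) < pvVerOf r := hlt
              cases hmg : PySem.List.max? g (fun r => pvVerOf r) with
              | none => rfl
              | some m =>
                have hm : pvPick g = m := by unfold pvPick; rw [hmg]; rfl
                rw [hm] at this
                simp [this]
            simp [Function.comp, hpc, hpc', hpg, hpick]
          · simp [Function.comp, hpc]
        · exact PySem.Dict.nodup_keys_insert groups c (g ++ [r]) hnodup
        · intro p hp
          rw [PySem.Dict.items_insert_of_contains groups (g ++ [r]) hmem] at hp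
          obtain ⟨q, hq, hqe⟩ := List.mem_map.mp hp
          by_cases hqc : (q.1 == c) = true <;> simp only [hqc, if_true, if_false] at hqe
          · rw [← hqe]; simp
          · rw [← hqe]; exact hne q hq
      · -- not larger: A keeps its record; B's group max is unchanged by the append
        simp only [hcontb, hlt, if_false, if_true, Bool.true_eq_false]
        apply ih
        · rw [PySem.Dict.items_insert_of_contains groups (g ++ [r]) hmem,
              hitems, List.map_map]
          apply List.map_congr_left
          intro p hp
          by_cases hpc : (p.1 == c) = true
          · have hpc' : p.1 = c := by simpa using hpc
            have hpg := huniq p hp hpc'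
            have hpick : pvPick (g ++ [r]) = pvPick g := by
              rw [hgetc] at hlt
              simp only [Option.getD_some] at hlt
              unfold pvPick
              rw [pvMax_append]
              cases hmg : PySem.List.max? g (fun r => pvVerOf r) with
              | none =>
                exact absurd ((PySem.List.max?_eq_none_iff _ _).mp hmg)
                  (hne (c, g) (PySem.Dict.mem_items_of_get?_eq_some groups hg))
              | some m =>
                have hm : pvPick g = m := by unfold pvPick; rw [hmg]; rfl
                rw [hm] at hlt
                have hlt' : ¬ pvVerOf m < pvVerOf r := hlt
                simp [hlt']
            simp [Function.comp, hpc, hpc', hpg, hpick]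
          · simp [Function.comp, hpc]
        · exact PySem.Dict.nodup_keys_insert groups c (g ++ [r]) hnodup
        · intro p hp
          rw [PySem.Dict.items_insert_of_contains groups (g ++ [r]) hmem] at hp
          obtain ⟨q, hq, hqe⟩ := List.mem_map.mp hp
          by_cases hqc : (q.1 == c) = true <;> simp only [hqc, if_true, if_false] at hqe
          · rw [← hqe]; simp
          · rw [← hqe]; exact hne q hq
    · -- fresh key: both sides append a new entry
      have hmem' : groups.contains c = false := by
        cases h : groups.contains c
        · rfl
        · exact absurd h hmem
      have hcontb : best.contains c = false := by rw [hcontains]; exact hmem'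
      have hmod : PySem.Dict.modify groups c [] (· ++ [r]) = groups.insert c [r] := by
        simp [PySem.Dict.modify, PySem.Dict.getD_of_not_contains groups ([] : List (List (String × String))) hmem']
      rw [hmod]
      simp only [hcontb, if_true]
      apply ih
      · rw [PySem.Dict.items_insert_of_not_contains best r hcontb,
            PySem.Dict.items_insert_of_not_contains groups [r] hmem',
            hitems, List.map_append]
        rfl
      · exact PySem.Dict.nodup_keys_insert groups c [r] hnodup
      · intro p hp
        rw [PySem.Dict.items_insert_of_not_contains groups [r] hmem', List.mem_append] at hp
        cases hp with
        | inl h => exact hne p h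
        | inr h => rw [List.mem_singleton.mp h]; simp

-- ===== VERDICT (by name: the statement is the Claim_ definition above) =====
theorem dedup_records_spec : Claim_equal_dedup_records := by
  intro records _ _
  unfold Spec_dedup_records dedup_records dedup_records_alt
  simp only [PySem.Dict.values]
  rw [pvMain records PySem.Dict.empty PySem.Dict.empty (by rfl) (by simp [PySem.Dict.empty]) (by simp [PySem.Dict.empty])]
  simp only [List.map_map]
  rfl
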